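-- pv_equiv track=rewrite | github.com/mauercho/for_codingtest | 백준/Silver/2491. 수열/수열.py | mns_check
-- ===== SOURCE A (Python) =====
-- def mns_check(N, arr):
--     is_mns = False
--     mns_cnt = 1
--     cnt = 0
--     for i in range(N - 1):
--         if is_mns == False:
--             if arr[i] >= arr[i + 1]:
--                 mns_cnt = 2  # mns_cnt 갱신
--                 is_mns = True
--             else:
--                 mns_cnt = 1  # mns_cnt 갱신
--         elif is_mns == True:
--             if arr[i] >= arr[i + 1]:
--                 mns_cnt += 1
--             else:
--                 mns_cnt = 1  # mns_cnt 갱신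
--         cnt = max(cnt, mns_cnt)
--     return cnt
-- ===== SOURCE B (Python) =====
-- def mns_check(N, arr):
--     if N < 2:
--         return 0
--     c = [arr[i] >= arr[i + 1] for i in range(N - 1)]
--     best = 0
--     i = 0
--     n = len(c)
--     while i < n:
--         j = i
--         while j < n and c[j] == c[i]:
--             j += 1
--         if c[i]:
--             best = max(best, j - i)
--         i = j
--     return best + 1
-- ===== Notes on version B (the rewrite author's own statement) =====
-- stated objective: alternative
-- what changed: A is a single stateful pass with a flag/counter/reset; B first materialises the boolean comparison list c, then scans it group-by-group with two pointers (a hand-rolled groupby), takes the longest True-group length L and returns L+1 (0 when N<2).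
import Mathlib
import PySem

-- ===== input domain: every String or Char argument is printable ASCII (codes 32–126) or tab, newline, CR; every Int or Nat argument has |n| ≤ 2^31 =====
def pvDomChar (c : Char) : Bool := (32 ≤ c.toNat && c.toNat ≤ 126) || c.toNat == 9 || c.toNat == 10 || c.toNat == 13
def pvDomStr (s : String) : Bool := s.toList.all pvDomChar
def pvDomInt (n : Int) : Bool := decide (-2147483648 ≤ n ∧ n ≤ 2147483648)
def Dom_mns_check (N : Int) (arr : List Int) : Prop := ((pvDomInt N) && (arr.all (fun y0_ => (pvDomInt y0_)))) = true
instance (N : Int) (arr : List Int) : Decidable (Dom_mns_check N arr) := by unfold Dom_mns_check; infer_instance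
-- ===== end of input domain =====

-- B replaces A's single stateful flag/counter pass by a two-phase scan: build the
-- comparison list, then measure maximal runs with a grouping pass (objective: alternative).

-- ===== PORT A =====
def mns_check (N : Int) (arr : List Int) : Int :=
  (((PySem.List.pyRange 0 (N - 1) 1).foldl
    (fun (st : Bool × Int × Int) i =>
      let p :=
        if st.1 = false then
          (if PySem.List.pyGetD arr i 0 ≥ PySem.List.pyGetD arr (i + 1) 0
           then (true, (2 : Int)) else (st.1, 1))
        else
          (if PySem.List.pyGetD arr i 0 ≥ PySem.List.pyGetD arr (i + 1) 0
           then (st.1, st.2.1 + 1) else (st.1, 1))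
      (p.1, p.2, max st.2.2 p.2))
    (false, 1, 0)).2.2)

-- ===== PORT B =====
-- the inner `while j < n and c[j] == c[i]` of Source B: one group = head run (takeWhile),
-- the scan resumes at j (dropWhile); each group recorded with its length
def altGroups : List Bool → List (Bool × Int)
  | [] => []
  | x :: xs =>
    (x, 1 + ((xs.takeWhile (· == x)).length : Int)) :: altGroups (xs.dropWhile (· == x))
  termination_by l => l.length
  decreasing_by
    exact Nat.lt_succ_of_le (List.length_dropWhile_le _ _)

def mns_check_alt (N : Int) (arr : List Int) : Int :=
  if N < 2 then 0
  else
    let c := (PySem.List.pyRange 0 (N - 1) 1).map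
      (fun i => decide (PySem.List.pyGetD arr i 0 ≥ PySem.List.pyGetD arr (i + 1) 0))
    let best := (altGroups c).foldl (fun b g => if g.1 then max b g.2 else b) 0
    best + 1

-- ===== PRECONDITION & SPEC =====
-- Python A (and B) raise IndexError when 2 ≤ N but N exceeds len(arr); excluded.
def Pre_mns_check (N : Int) (arr : List Int) : Prop := N ≤ (arr.length : Int) ∨ N ≤ 1
instance (N : Int) (arr : List Int) : Decidable (Pre_mns_check N arr) := by
  unfold Pre_mns_check; infer_instance
def pvWitness_mns_check : Int × List Int := (4, [3, 3, 2, 5])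

def Spec_mns_check (N : Int) (arr : List Int) (out : Int) : Prop := out = mns_check_alt N arr
instance (N : Int) (arr : List Int) (out : Int) : Decidable (Spec_mns_check N arr out) := by
  unfold Spec_mns_check; infer_instance

-- ===== CLAIM (what is proved, stated in full; the proofs are below) =====
def Claim_equal_mns_check : Prop := ∀ (N : Int) (arr : List Int), Dom_mns_check N arr → Pre_mns_check N arr → Spec_mns_check N arr (mns_check N arr)

-- ===== LEMMAS AND PROOFS =====

theorem altGroups_nil : altGroups [] = [] := by rw [altGroups]

theorem altGroups_cons (x : Bool) (xs : List Bool) :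
    altGroups (x :: xs)
      = (x, 1 + ((xs.takeWhile (· == x)).length : Int)) :: altGroups (xs.dropWhile (· == x)) := by
  rw [altGroups]

-- A's loop body as a function of the boolean comparison
def stepT (st : Bool × Int × Int) (t : Bool) : Bool × Int × Int :=
  let p :=
    if st.1 = false then (if t then (true, (2 : Int)) else (st.1, 1))
    else (if t then (st.1, st.2.1 + 1) else (st.1, 1))
  (p.1, p.2, max st.2.2 p.2)

-- "best run ending here" view of A's pass
def gg : List Bool → Int → Int
  | [], _ => 0
  | true :: t, m => max (m + 1) (gg t (m + 1))
  | false :: t, _ => max 1 (gg t 1)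

def mtg (gs : List (Bool × Int)) : Int :=
  gs.foldl (fun b g => if g.1 then max b g.2 else b) 0

theorem mtg_mono : ∀ (gs : List (Bool × Int)) (a : Int),
    a ≤ gs.foldl (fun b g => if g.1 then max b g.2 else b) a := by
  intro gs
  induction gs with
  | nil => intro a; simp
  | cons g t ih =>
    intro a
    simp only [List.foldl_cons]
    refine le_trans ?_ (ih _)
    split
    · exact le_max_left _ _
    · exact le_rfl

theorem mtg_nonneg (gs : List (Bool × Int)) : 0 ≤ mtg gs := mtg_mono gs 0

theorem mtg_init : ∀ (gs : List (Bool × Int)) (a : Int), 0 ≤ a →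
    gs.foldl (fun b g => if g.1 then max b g.2 else b) a = max a (mtg gs) := by
  intro gs
  induction gs with
  | nil =>
    intro a ha
    simp only [List.foldl_nil, mtg]
    omega
  | cons g t ih =>
    intro a ha
    obtain ⟨v, x⟩ := g
    have h0 : (0 : Int) ≤ mtg t := mtg_nonneg t
    cases v with
    | true =>
      have l1 := ih (max a x) (by omega)
      have l2 := ih (max 0 x) (by omega)
      show t.foldl _ (max a x) = max a (mtg ((true, x) :: t))
      rw [l1]
      have : mtg ((true, x) :: t) = max (max 0 x) (mtg t) := by
        show t.foldl _ (max 0 x) = _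
        rw [l2]
      rw [this]
      omega
    | false =>
      show t.foldl _ a = max a (mtg ((false, x) :: t))
      have : mtg ((false, x) :: t) = mtg t := rfl
      rw [this, ih a ha, mtg]

theorem mtg_cons_true (x : Int) (gs : List (Bool × Int)) (hx : 0 ≤ x) :
    mtg ((true, x) :: gs) = max x (mtg gs) := by
  have h0 := mtg_nonneg gs
  have l := mtg_init gs (max 0 x) (by omega)
  show gs.foldl _ (max 0 x) = _
  rw [l]
  omega

theorem mtg_cons_false (x : Int) (gs : List (Bool × Int)) :
    mtg ((false, x) :: gs) = mtg gs := rfl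

theorem foldT_true : ∀ (l : List Bool) (m cn : Int), 0 ≤ cn →
    (l.foldl stepT (true, m, cn)).2.2 = max cn (gg l m) := by
  intro l
  induction l with
  | nil => intro m cn h; simp [gg]; omega
  | cons b t ih =>
    intro m cn h
    cases b with
    | true =>
      have hs : stepT (true, m, cn) true = (true, m + 1, max cn (m + 1)) := by
        simp [stepT]
      rw [List.foldl_cons, hs, ih (m + 1) (max cn (m + 1)) (by omega)]
      show _ = max cn (max (m + 1) (gg t (m + 1)))
      omega
    | false =>
      have hs : stepT (true, m, cn) false = (true, 1, max cn 1) := by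
        simp [stepT]
      rw [List.foldl_cons, hs, ih 1 (max cn 1) (by omega)]
      show _ = max cn (max 1 (gg t 1))
      omega

theorem foldT_start : ∀ (l : List Bool) (cn : Int), 0 ≤ cn →
    (l.foldl stepT (false, 1, cn)).2.2 = max cn (gg l 1) := by
  intro l
  induction l with
  | nil => intro cn h; simp [gg]; omega
  | cons b t ih =>
    intro cn h
    cases b with
    | true =>
      have hs : stepT (false, 1, cn) true = (true, 2, max cn 2) := by simp [stepT]
      rw [List.foldl_cons, hs, foldT_true t 2 (max cn 2) (by omega)]
      show _ = max cn (max 2 (gg t 2))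
      omega
    | false =>
      have hs : stepT (false, 1, cn) false = (false, 1, max cn 1) := by simp [stepT]
      rw [List.foldl_cons, hs, ih (max cn 1) (by omega)]
      show _ = max cn (max 1 (gg t 1))
      omega

theorem gg_run : ∀ (k : Nat) (rest : List Bool) (m : Int),
    gg (List.replicate (k + 1) true ++ rest) m
      = max (m + (k + 1)) (gg rest (m + (k + 1))) := by
  intro k
  induction k with
  | zero => intro rest m; simp [gg]
  | succ k ih =>
    intro rest m
    rw [List.replicate_succ, List.cons_append]
    show max (m + 1) (gg (List.replicate (k + 1) true ++ rest) (m + 1)) = _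
    rw [ih rest (m + 1)]
    have h1 : m + 1 + ((k : Int) + 1) = m + ((k : Int) + 1 + 1) := by ring
    rw [h1]
    push_cast
    omega

theorem dropWhile_head_false : ∀ (l : List Bool) (b : Bool) (t : List Bool),
    l.dropWhile (· == true) = b :: t → b = false := by
  intro l
  induction l with
  | nil => intro b t h; simp [List.dropWhile] at h
  | cons x r ih =>
    intro b t h
    cases x with
    | true => rw [List.dropWhile_cons_of_pos (by simp)] at h; exact ih b t h
    | false => rw [List.dropWhile_cons_of_neg (by simp)] at h; cases h; rfl

theorem mtg_aG_false (t : List Bool) :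
    mtg (altGroups (false :: t)) = mtg (altGroups t) := by
  cases t with
  | nil =>
    rw [altGroups_cons]
    simp only [List.takeWhile_nil, List.dropWhile_nil, mtg_cons_false]
  | cons x r =>
    cases x with
    | true =>
      rw [altGroups_cons, List.takeWhile_cons_of_neg (by simp),
        List.dropWhile_cons_of_neg (by simp), mtg_cons_false]
    | false =>
      rw [altGroups_cons (false) (false :: r), List.dropWhile_cons_of_pos (by simp),
        mtg_cons_false, altGroups_cons, mtg_cons_false]

theorem gg_eq_mtg : ∀ (n : Nat) (l : List Bool), l.length ≤ n →
    gg l 1 = if l = [] then 0 else mtg (altGroups l) + 1 := by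
  intro n
  induction n with
  | zero =>
    intro l h
    have : l = [] := List.length_eq_zero_iff.mp (Nat.le_zero.mp h)
    subst this; simp [gg]
  | succ n ih =>
    intro l h
    cases l with
    | nil => simp [gg]
    | cons x xs =>
      cases x with
      | false =>
        have hgg : gg (false :: xs) 1 = max 1 (gg xs 1) := by simp [gg]
        have hih := ih xs (by simpa using Nat.le_of_succ_le_succ h)
        have h0 : (0 : Int) ≤ mtg (altGroups xs) := mtg_nonneg _
        rw [hgg, hih, if_neg (by simp : ¬(false :: xs = [])), mtg_aG_false]
        by_cases hx : xs = []
        · subst hx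
          rw [if_pos rfl, altGroups_nil]
          show max 1 0 = mtg [] + 1
          rfl
        · rw [if_neg hx]
          omega
      | true =>
        -- decompose the leading run of `true`s
        set tw := xs.takeWhile (· == true) with htw
        set dw := xs.dropWhile (· == true) with hdw
        have hsplit : xs = tw ++ dw := (List.takeWhile_append_dropWhile).symm
        have hrep : tw = List.replicate tw.length true := by
          apply List.eq_replicate_of_mem
          intro b hb
          have := List.mem_takeWhile_imp hb
          simpa using this
        have hl : true :: xs = List.replicate (tw.length + 1) true ++ dw := by
          rw [List.replicate_succ, List.cons_append]
          rw [hsplit]; rw [← hrep]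
        have hggl : gg (true :: xs) 1
            = max (1 + ((tw.length : Int) + 1)) (gg dw (1 + ((tw.length : Int) + 1))) := by
          rw [hl]
          have := gg_run tw.length dw 1
          push_cast at this ⊢
          exact this
        have hgroups : altGroups (true :: xs)
            = (true, 1 + (tw.length : Int)) :: altGroups dw := by
          rw [altGroups_cons]
        have hmtg : mtg (altGroups (true :: xs))
            = max (1 + (tw.length : Int)) (mtg (altGroups dw)) := by
          rw [hgroups, mtg_cons_true _ _ (by positivity)]
        have hdwlen : dw.length ≤ n := by
          have h1 : tw.length + dw.length = xs.length := by
            conv_rhs => rw [hsplit]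
            rw [List.length_append]
          have h2 : xs.length + 1 ≤ n + 1 := by simpa using h
          omega
        rw [if_neg (by simp : ¬(true :: xs = [])), hggl, hmtg]
        have h0 : (0 : Int) ≤ mtg (altGroups dw) := mtg_nonneg _
        cases hdwc : dw with
        | nil =>
          rw [altGroups_nil]
          have hg : gg [] (1 + ((tw.length : Int) + 1)) = 0 := rfl
          have hm : mtg ([] : List (Bool × Int)) = 0 := rfl
          rw [hg, hm]
          omega
        | cons b t =>
          have hb : b = false := dropWhile_head_false xs b t (by rw [← hdw, hdwc])
          subst hb
          have hindep : gg (false :: t) (1 + ((tw.length : Int) + 1)) = gg (false :: t) 1 := by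
            simp [gg]
          have hiht := ih (false :: t) (by rw [hdwc] at hdwlen; exact hdwlen)
          rw [hindep, hiht, if_neg (by simp : ¬(false :: t = []))]
          have h0' : (0 : Int) ≤ mtg (altGroups (false :: t)) := mtg_nonneg _
          omega

-- bridge: A's fold over indices is the stepT fold over the comparison list c
theorem foldA_bridge (N : Int) (arr : List Int) :
    mns_check N arr
      = ((((PySem.List.pyRange 0 (N - 1) 1).map
            (fun i => decide (PySem.List.pyGetD arr i 0 ≥ PySem.List.pyGetD arr (i + 1) 0))).foldl
          stepT (false, 1, 0)).2.2) := by
  unfold mns_check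
  rw [List.foldl_map]
  refine congrArg (fun f => (List.foldl f ((false : Bool), (1 : Int), (0 : Int))
    (PySem.List.pyRange 0 (N - 1) 1)).2.2) ?_
  funext st i
  by_cases h : PySem.List.pyGetD arr i 0 ≥ PySem.List.pyGetD arr (i + 1) 0 <;>
    simp [stepT, h]

-- ===== VERDICT (by name: the statement is the Claim_ definition above) =====
theorem mns_check_spec : Claim_equal_mns_check := by
  intro N arr _hdom _hpre
  unfold Spec_mns_check
  by_cases hN : N < 2
  · have hnil : PySem.List.pyRange 0 (N - 1) 1 = [] :=
      PySem.List.pyRange_one_eq_nil (by omega)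
    unfold mns_check mns_check_alt
    rw [hnil]
    simp [hN]
  · set c := (PySem.List.pyRange 0 (N - 1) 1).map
      (fun i => decide (PySem.List.pyGetD arr i 0 ≥ PySem.List.pyGetD arr (i + 1) 0)) with hc
    have hclen : c.length = (N - 1).toNat := by
      rw [hc, List.length_map, PySem.List.length_pyRange_one]
      omega
    have hcne : c ≠ [] := by
      intro h0
      rw [h0] at hclen
      simp at hclen
      omega
    have hA : mns_check N arr = max 0 (gg c 1) := by
      rw [foldA_bridge, ← hc, foldT_start c 0 le_rfl]
    have hB : mns_check_alt N arr = mtg (altGroups c) + 1 := by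
      unfold mns_check_alt
      rw [if_neg hN, ← hc]
      rfl
    rw [hA, hB, gg_eq_mtg c.length c le_rfl, if_neg hcne]
    have h0 : (0 : Int) ≤ mtg (altGroups c) := mtg_nonneg _
    omega
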